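-- pv_equiv track=rewrite | github.com/xJohnKennedy/src | python_scripts/stringParserPoints.py | SeparaString
-- ===== SOURCE A (Python) =====
-- def SeparaString(palavra: str):
--     pontos = []
--     palavraPath = ""
--     # separa as virgulas pois esta delimitam tradutores diferentes
--     tradutorVirgula = palavra.split(",")
--
--     for i in tradutorVirgula:
--         palavraPath = palavraPath + "_c%s" % (i)
--         pass
--
--     for trechoString in tradutorVirgula:
--         if '$' in trechoString:
--             tradutor = trechoString.split("-")
--             nome = tradutor[0]
--             #conta ocorrencias de $ na string formadora dos nomes
--             count = 0
--             for i in nome: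
--                 if i == '$':
--                     count = count + 1
--             conjunto_gerador = [nome]
--             conjunto_gerado = []
--             for i in range(count):
--                 #obtem os codigos a substituir
--                 cod_subs = tradutor[i + 1]
--                 if '#' in cod_subs:
--                     cod_subs = cod_subs.split("#")
--                     cod_subs = range(int(cod_subs[0]), int(cod_subs[1]) + 1)
--                 for j in conjunto_gerador:
--                     for k in cod_subs:
--                         conjunto_gerado.append(j.replace('$', str(k), 1))
--                 conjunto_gerador = conjunto_gerado
--                 conjunto_gerado = []
--             pontos.extend(conjunto_gerador)
--             pass
--         else:
--             pontos.append(trechoString)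
--             pass
--         pass
--
--     return pontos, palavraPath
-- ===== SOURCE B (Python) =====
-- import itertools
--
-- def _codes(cs):
--     # the substitution codes one placeholder draws from
--     if '#' in cs:
--         partes = cs.split("#")
--         return [str(v) for v in range(int(partes[0]), int(partes[1]) + 1)]
--     return list(cs)
--
-- def SeparaString(palavra: str):
--     segmentos = palavra.split(",")
--     palavraPath = "".join("_c%s" % s for s in segmentos)
--     pontos = []
--     for seg in segmentos:
--         if '$' in seg:
--             tradutor = seg.split("-")
--             nome = tradutor[0]
--             code_lists = [_codes(tradutor[i + 1]) for i in range(nome.count('$'))]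
--             for combo in itertools.product(*code_lists):
--                 r = nome
--                 for k in combo:
--                     r = r.replace('$', k, 1)
--                 pontos.append(r)
--         else:
--             pontos.append(seg)
--     return pontos, palavraPath
-- ===== Notes on version B (the rewrite author's own statement) =====
-- stated objective: idiomatic
-- what changed: A grows a frontier set one placeholder at a time (three nested loops per step); B computes all code lists up front and iterates itertools.product over them, applying the chain of single replaces per combination, and builds the path with a join over the segments.
import Mathlib
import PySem

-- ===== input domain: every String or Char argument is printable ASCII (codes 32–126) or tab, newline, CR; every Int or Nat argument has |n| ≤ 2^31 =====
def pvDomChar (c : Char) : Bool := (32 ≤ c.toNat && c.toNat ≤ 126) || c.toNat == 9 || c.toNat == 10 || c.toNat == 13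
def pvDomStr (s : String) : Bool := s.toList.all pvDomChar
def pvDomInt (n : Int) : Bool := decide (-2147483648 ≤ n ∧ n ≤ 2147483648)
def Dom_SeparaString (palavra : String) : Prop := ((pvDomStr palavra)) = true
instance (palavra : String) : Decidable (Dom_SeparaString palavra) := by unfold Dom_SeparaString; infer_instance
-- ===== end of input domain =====

-- B replaces A's per-placeholder frontier expansion by computing all code lists up front and iterating
-- itertools.product over them (objective: idiomatic); identical return values on Pre_.

-- ===== PORT A =====
-- shared helper: j.replace('$', k, 1) — replace the FIRST '$' (exact: the old string is the single char '$')
def pvReplChars (k : List Char) : List Char → List Char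
  | [] => []
  | c :: rest => if c == '$' then k ++ rest else c :: pvReplChars k rest

def pvRepl (j k : String) : String := String.ofList (pvReplChars k.toList j.toList)

-- shared helper: the code list one cod_subs entry yields (both Pythons compute exactly this);
-- int() failures are totalized with 0 — Pre_ excludes them (Python raises ValueError there)
def pvCodes (cs : String) : List String :=
  if PySem.Str.isIn "#" cs then
    let ps := (PySem.Str.split? cs "#").getD []   -- the separator is nonempty, so split? is `some`
    (PySem.List.pyRange ((PySem.Int.ofStr? (PySem.List.pyGetD ps 0 "")).getD 0)
        (((PySem.Int.ofStr? (PySem.List.pyGetD ps 1 "")).getD 0) + 1) 1).map PySem.Int.toStr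
  else cs.toList.map (fun c => String.ofList [c])     -- for k in cs: str(k) = k

def SeparaString (palavra : String) : List String × String :=
  let tradutorVirgula := (PySem.Str.split? palavra ",").getD []   -- the separator is nonempty, so split? is `some`
  let palavraPath := tradutorVirgula.foldl (fun acc i => acc ++ '_' :: 'c' :: i.toList) ([] : List Char)
  let pontos := tradutorVirgula.foldl (fun pontos trechoString =>
    if PySem.Str.isIn "$" trechoString then
      let tradutor := (PySem.Str.split? trechoString "-").getD []
      let nome := PySem.List.pyGetD tradutor 0 ""
      let count := nome.toList.foldl (fun c i => if i == '$' then c + 1 else c) 0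
      let conjunto := (List.range count).foldl
        (fun conjunto_gerador i =>
          conjunto_gerador.foldl (fun conjunto_gerado j =>
            (pvCodes (PySem.List.pyGetD tradutor ((i + 1 : Nat) : Int) "")).foldl
              (fun conjunto_gerado k => conjunto_gerado ++ [pvRepl j k]) conjunto_gerado) [])
        [nome]
      pontos ++ conjunto
    else pontos ++ [trechoString]) []
  (pontos, String.ofList palavraPath)

-- ===== PORT B =====
-- itertools.product: leftmost factor varies slowest
def pvProduct : List (List String) → List (List String)
  | [] => [[]]
  | l :: ls => l.flatMap (fun x => (pvProduct ls).map (x :: ·))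

def SeparaString_alt (palavra : String) : List String × String :=
  let segmentos := (PySem.Str.split? palavra ",").getD []
  let palavraPath := PySem.Chars.join [] (segmentos.map (fun s => '_' :: 'c' :: s.toList))
  let pontos := segmentos.foldl (fun pontos seg =>
    if PySem.Str.isIn "$" seg then
      let tradutor := (PySem.Str.split? seg "-").getD []
      let nome := PySem.List.pyGetD tradutor 0 ""
      let codeLists := (List.range (PySem.Str.count nome "$")).map
        (fun i => pvCodes (PySem.List.pyGetD tradutor ((i + 1 : Nat) : Int) ""))
      pontos ++ (pvProduct codeLists).map (fun combo => combo.foldl pvRepl nome)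
    else pontos ++ [seg]) []
  (pontos, String.ofList palavraPath)

-- ===== PRECONDITION & SPEC =====
-- Pre_ excludes exactly the inputs where Python A raises: a '$'-segment whose '-'-split has fewer
-- entries than 1 + number of '$' in its first part (IndexError on tradutor[i+1]) or whose used
-- '#'-entry has a bound int() rejects (ValueError); B raises identically there.
def pvPreSeg (seg : String) : Bool :=
  !(PySem.Str.isIn "$" seg) ||
    (let tradutor := (PySem.Str.split? seg "-").getD []
     let count := PySem.Str.count (PySem.List.pyGetD tradutor 0 "") "$"
     decide (count + 1 ≤ tradutor.length) &&
       (List.range count).all (fun i =>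
         let cs := PySem.List.pyGetD tradutor ((i + 1 : Nat) : Int) ""
         !(PySem.Str.isIn "#" cs) ||
           (let ps := (PySem.Str.split? cs "#").getD []
            (PySem.Int.ofStr? (PySem.List.pyGetD ps 0 "")).isSome &&
              (PySem.Int.ofStr? (PySem.List.pyGetD ps 1 "")).isSome)))

def Pre_SeparaString (palavra : String) : Prop :=
  ((PySem.Str.split? palavra ",").getD []).all pvPreSeg = true
instance (palavra : String) : Decidable (Pre_SeparaString palavra) := by unfold Pre_SeparaString; infer_instance

def pvWitness_SeparaString : String := "a$b$-1#3-xy,q"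

def Spec_SeparaString (palavra : String) (out : List String × String) : Prop := out = SeparaString_alt palavra
instance (palavra : String) (out : List String × String) : Decidable (Spec_SeparaString palavra out) := by unfold Spec_SeparaString; infer_instance

-- ===== CLAIM (what is proved, stated in full; the proofs are below) =====
def Claim_equal_SeparaString : Prop := ∀ (palavra : String), Dom_SeparaString palavra → Pre_SeparaString palavra → Spec_SeparaString palavra (SeparaString palavra)

-- ===== LEMMAS AND PROOFS =====

-- equation lemmas for PySem.Chars.count.go at sub = ['$']
lemma pvGo_nil (n acc : Nat) : PySem.Chars.count.go ['$'] n [] acc = acc := by cases n <;> rfl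

lemma pvGo_succ (n acc : Nat) (c : Char) (t : List Char) :
    PySem.Chars.count.go ['$'] (n + 1) (c :: t) acc =
      if ('$' == c) then PySem.Chars.count.go ['$'] n t (acc + 1)
      else PySem.Chars.count.go ['$'] n t acc := by
  show (if ['$'].isPrefixOf (c :: t) then _ else _) = _
  simp [List.isPrefixOf]

lemma pvGo_count (fuel : Nat) (l : List Char) (acc : Nat) (h : l.length ≤ fuel) :
    PySem.Chars.count.go ['$'] fuel l acc = acc + l.countP (· == '$') := by
  induction fuel generalizing l acc with
  | zero =>
    cases l with
    | nil => simp [pvGo_nil]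
    | cons c t => simp at h
  | succ n ih =>
    cases l with
    | nil => simp [pvGo_nil]
    | cons c t =>
      rw [pvGo_succ, List.countP_cons]
      have ht : t.length ≤ n := by simp at h; omega
      by_cases hc : c = '$'
      · subst hc
        rw [if_pos (by simp), ih t _ ht]
        simp; omega
      · have h2 : ¬ (('$' == c) = true) := by simp only [beq_iff_eq]; exact fun h => hc h.symm
        rw [if_neg h2, ih t _ ht]
        simp [hc]

-- A's manual '$'-counting loop computes nome.count('$')
lemma pvFoldlCount (l : List Char) (a : Nat) :
    l.foldl (fun c i => if i == '$' then c + 1 else c) a = a + l.countP (· == '$') := by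
  induction l generalizing a with
  | nil => simp
  | cons c t ih =>
    rw [List.foldl_cons, List.countP_cons]
    by_cases hc : (c == '$') = true
    · rw [if_pos hc, ih]; simp [hc]; omega
    · rw [if_neg hc, ih]; simp [hc]

lemma pvCount_eq (nome : String) :
    nome.toList.foldl (fun c i => if i == '$' then c + 1 else c) 0 = PySem.Str.count nome "$" := by
  rw [PySem.Str.count_eq, PySem.Chars.count, pvFoldlCount]
  simp [pvGo_count nome.length nome.toList 0 (by simp)]

-- the inner two loops of one expansion step
lemma pvStep_eq (codes gen : List String) :
    gen.foldl (fun ger j => codes.foldl (fun ger k => ger ++ [pvRepl j k]) ger) [] =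
      gen.flatMap (fun j => codes.map (pvRepl j)) := by
  simp only [PySem.List.foldl_append_singleton_eq_map]
  simpa using PySem.List.foldl_append_eq_flatMap (fun j => codes.map (pvRepl j)) gen []

-- frontier expansion over all the (indexed) code lists = cartesian product, leftmost slowest
lemma pvExpand_eq (g : Nat → List String) (idxs : List Nat) (S : List String) :
    idxs.foldl (fun gen i =>
        gen.foldl (fun ger j => (g i).foldl (fun ger k => ger ++ [pvRepl j k]) ger) []) S =
      S.flatMap (fun j => (pvProduct (idxs.map g)).map (fun combo => combo.foldl pvRepl j)) := by
  induction idxs generalizing S with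
  | nil => simp [pvProduct]
  | cons c rest ih =>
    rw [List.foldl_cons, ih, pvStep_eq, List.map_cons, pvProduct]
    simp [List.flatMap_assoc, List.map_flatMap, List.flatMap_map, List.map_map, Function.comp_def]

-- "".join("_c%s" % s …) builds the same path as A's appending loop
lemma pvJoin_nil_eq_flatten (ps : List (List Char)) : PySem.Chars.join [] ps = ps.flatten := by
  induction ps with
  | nil => simp [PySem.Chars.join_nil]
  | cons p rest ih =>
    cases rest with
    | nil => simp [PySem.Chars.join_singleton]
    | cons q r => simp [PySem.Chars.join_cons_cons, ih]

-- ===== VERDICT (by name: the statement is the Claim_ definition above) =====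
set_option maxHeartbeats 1000000 in
theorem SeparaString_spec : Claim_equal_SeparaString := by
  intro palavra _ _
  unfold Spec_SeparaString
  simp only [SeparaString, SeparaString_alt]
  refine Prod.ext ?_ ?_
  · simp only
    apply PySem.List.foldl_congr_mem
    intro acc seg _
    by_cases hs : PySem.Str.isIn "$" seg = true
    · simp only [hs, if_true, pvCount_eq]
      rw [pvExpand_eq]
      simp
    · rw [if_neg hs, if_neg hs]
  · simp only
    rw [pvJoin_nil_eq_flatten]
    simp only [PySem.List.foldl_append_eq_flatMap, List.nil_append, List.flatMap_def]
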